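-- pv_equiv track=rewrite | github.com/MeisterLLD/aoc2025 | 10.py | bfs
-- ===== SOURCE A (Python) =====
-- from collections import deque
--
-- def bfs(initmsk, targetmsk, buttonsmsk):
--     dist = {initmsk : 0}
--     file = deque([initmsk])
--     while file:
--         x = file.popleft()
--
--         if x == targetmsk:
--             return dist[x]
--
--         for b in buttonsmsk:
--             v = x^b
--             if v not in dist:
--                 file.append(v)
--                 dist[v] = dist[x]+1
-- ===== SOURCE B (Python) =====
-- def bfs(initmsk, targetmsk, buttonsmsk):
--     # Subset DP over GF(2) instead of a graph search: a shortest press sequence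
--     # never presses any button an even number of times, so the answer is the
--     # minimum size of a sub-multiset of buttonsmsk whose XOR is initmsk ^ targetmsk.
--     # One knapsack pass per button; no queue, no frontier, no graph.
--     dp = {0: 0}
--     for b in buttonsmsk:
--         nxt = dict(dp)
--         for v, c in dp.items():
--             w = v ^ b
--             if w not in nxt or nxt[w] > c + 1:
--                 nxt[w] = c + 1
--         dp = nxt
--     return dp.get(initmsk ^ targetmsk)
-- ===== Notes on version B (the rewrite author's own statement) =====
-- stated objective: alternative
-- what changed: Replaced the BFS graph search over XOR states (deque + per-node distance dict) by a subset DP over the buttons: since a shortest press sequence never presses a button an even number of times, the answer is the minimum size of a sub-multiset of buttonsmsk XORing to initmsk ^ targetmsk, computed by one knapsack pass per button; no queue, no frontier, no graph traversal.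
import Mathlib
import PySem

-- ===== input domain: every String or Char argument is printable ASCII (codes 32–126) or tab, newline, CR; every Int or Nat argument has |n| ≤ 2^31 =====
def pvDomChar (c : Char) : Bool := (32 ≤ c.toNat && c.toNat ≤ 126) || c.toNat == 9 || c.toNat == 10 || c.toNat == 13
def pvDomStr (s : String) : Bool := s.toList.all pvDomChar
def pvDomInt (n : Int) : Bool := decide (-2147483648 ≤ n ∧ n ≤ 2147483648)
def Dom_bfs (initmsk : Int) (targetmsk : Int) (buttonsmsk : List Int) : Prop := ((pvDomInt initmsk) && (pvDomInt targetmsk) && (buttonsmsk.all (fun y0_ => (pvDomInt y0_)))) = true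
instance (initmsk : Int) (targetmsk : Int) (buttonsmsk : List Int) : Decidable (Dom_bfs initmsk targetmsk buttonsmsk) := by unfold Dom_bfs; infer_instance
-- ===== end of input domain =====

-- B replaces A's breadth-first search over XOR states by a subset DP over the buttons
-- (a shortest press sequence never presses a button an even number of times, so the answer
-- is the minimum size of a sub-multiset of buttonsmsk XORing to initmsk ^ targetmsk):
-- no queue, no frontier, no graph — one knapsack pass per button.
-- Both Pythons terminate on every input; A's port uses a fuel of 2^|buttonsmsk|+1 loop
-- iterations, which is provably enough (every dequeued state is distinct and lies in the
-- xor-span of the buttons, of size 2^|buttonsmsk|).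

-- ===== PORT A =====
-- inner 'for b in buttonsmsk' loop of A: acc = (queue-after-x, dist); Python's dist[x] is total here because
-- x is always a key of dist (it was enqueued), so getD is exact.
def bfsABtn (x : Int) (acc : List Int × PySem.Dict Int Int) (b : Int) :
    List Int × PySem.Dict Int Int :=
  let v := PySem.Int.bxor x b
  if (PySem.Dict.get? acc.2 v).isSome then acc
  else (acc.1 ++ [v], PySem.Dict.insert acc.2 v (PySem.Dict.getD acc.2 x 0 + 1))

def bfsAStep (buttonsmsk : List Int) (x : Int) (acc : List Int × PySem.Dict Int Int) :
    List Int × PySem.Dict Int Int :=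
  buttonsmsk.foldl (bfsABtn x) acc

-- the 'while file:' loop; 'dist.get? x' is Python's 'return dist[x]' (x is always a key, see above)
def bfsAux (targetmsk : Int) (buttonsmsk : List Int) :
    Nat → List Int → PySem.Dict Int Int → Option Int
  | 0, _, _ => none
  | _ + 1, [], _ => none
  | fuel + 1, x :: q, dist =>
    if x = targetmsk then PySem.Dict.get? dist x
    else
      let s := bfsAStep buttonsmsk x (q, dist)
      bfsAux targetmsk buttonsmsk fuel s.1 s.2

def bfs (initmsk : Int) (targetmsk : Int) (buttonsmsk : List Int) : Option Int :=
  bfsAux targetmsk buttonsmsk (2 ^ buttonsmsk.length + 1) [initmsk]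
    (PySem.Dict.ofList [(initmsk, (0 : Int))])

-- ===== PORT B =====
-- body of B's inner 'for v, c in dp.items()' loop: nxt is the dict being built
def bfsDpInner (b : Int) (nxt : PySem.Dict Int Int) (vc : Int × Int) : PySem.Dict Int Int :=
  match PySem.Dict.get? nxt (PySem.Int.bxor vc.1 b) with      -- w := vc.1 ^ b; 'w not in nxt'
  | none => PySem.Dict.insert nxt (PySem.Int.bxor vc.1 b) (vc.2 + 1)
  | some a =>
    if vc.2 + 1 < a then PySem.Dict.insert nxt (PySem.Int.bxor vc.1 b) (vc.2 + 1) else nxt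

-- one button of B's outer loop: 'nxt = dict(dp)' then the items loop, then 'dp = nxt'
def bfsDpStep (dp : PySem.Dict Int Int) (b : Int) : PySem.Dict Int Int :=
  (PySem.Dict.items dp).foldl (bfsDpInner b) dp

def bfs_alt (initmsk : Int) (targetmsk : Int) (buttonsmsk : List Int) : Option Int :=
  let dp := buttonsmsk.foldl bfsDpStep (PySem.Dict.ofList [((0 : Int), (0 : Int))])
  PySem.Dict.get? dp (PySem.Int.bxor initmsk targetmsk)

-- ===== PRECONDITION & SPEC =====
def Spec_bfs (initmsk : Int) (targetmsk : Int) (buttonsmsk : List Int) (out : Option Int) : Prop := out = bfs_alt initmsk targetmsk buttonsmsk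
instance (initmsk : Int) (targetmsk : Int) (buttonsmsk : List Int) (out : Option Int) : Decidable (Spec_bfs initmsk targetmsk buttonsmsk out) := by unfold Spec_bfs; infer_instance

-- ===== CLAIM (what is proved, stated in full; the proofs are below) =====
def Claim_equal_bfs : Prop := ∀ (initmsk : Int) (targetmsk : Int) (buttonsmsk : List Int), Dom_bfs initmsk targetmsk buttonsmsk → Spec_bfs initmsk targetmsk buttonsmsk (bfs initmsk targetmsk buttonsmsk)

-- ===== LEMMAS AND PROOFS =====

-- ---------- XOR algebra ----------
-- sign/magnitude normal form for PySem.Int.bxor, used to derive associativity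
def pvMk (s : Bool) (k : Nat) : Int := if s then (k : Int) else -(k : Int) - 1

theorem pvMk_repr (a : Int) : pvMk (decide (0 ≤ a)) (if 0 ≤ a then a.toNat else (-a - 1).toNat) = a := by
  unfold pvMk
  by_cases h : 0 ≤ a
  · simp [h]
  · simp [h]
    omega

theorem pvBxor_mk (s t : Bool) (k l : Nat) :
    PySem.Int.bxor (pvMk s k) (pvMk t l) = pvMk (s == t) (k ^^^ l) := by
  unfold pvMk PySem.Int.bxor
  cases s <;> cases t <;> simp
  · have hk : ¬ (1 ≤ -(k:Int)) := by omega
    have hl : ¬ (1 ≤ -(l:Int)) := by omega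
    simp [hk, hl]
  · intro h; exact absurd h (by omega)
  · intro h; exact absurd h (by omega)

theorem pvBxor_assoc (a b c : Int) :
    PySem.Int.bxor (PySem.Int.bxor a b) c = PySem.Int.bxor a (PySem.Int.bxor b c) := by
  rw [← pvMk_repr a, ← pvMk_repr b, ← pvMk_repr c, pvBxor_mk, pvBxor_mk, pvBxor_mk, pvBxor_mk]
  rw [Nat.xor_assoc]
  cases (decide (0 ≤ a)) <;> cases (decide (0 ≤ b)) <;> cases (decide (0 ≤ c)) <;> rfl

theorem pvBxor_cancel (a b : Int) : PySem.Int.bxor (PySem.Int.bxor a b) b = a := by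
  rw [pvBxor_assoc, PySem.Int.bxor_self, PySem.Int.bxor_zero]

theorem pvBxor_right_comm (a b c : Int) :
    PySem.Int.bxor (PySem.Int.bxor a b) c = PySem.Int.bxor (PySem.Int.bxor a c) b := by
  rw [pvBxor_assoc, pvBxor_assoc, PySem.Int.bxor_comm b c]

theorem pvBxor_cancel_left (a b : Int) : PySem.Int.bxor a (PySem.Int.bxor a b) = b := by
  rw [← pvBxor_assoc, PySem.Int.bxor_self, PySem.Int.bxor_comm, PySem.Int.bxor_zero]

-- ---------- the xor-span of the buttons: every reachable state lies in it ----------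
def pvSpan : List Int → Int → List Int
  | [], i => [i]
  | b :: r, i => pvSpan r i ++ (pvSpan r i).map (fun y => PySem.Int.bxor y b)

theorem pvSpan_self (bs : List Int) (i : Int) : i ∈ pvSpan bs i := by
  induction bs with
  | nil => simp [pvSpan]
  | cons b r ih => simpa [pvSpan] using Or.inl ih

theorem pvSpan_length (bs : List Int) (i : Int) : (pvSpan bs i).length = 2 ^ bs.length := by
  induction bs with
  | nil => simp [pvSpan]
  | cons b r ih => simp [pvSpan, ih]; ring

theorem pvSpan_closed (bs : List Int) (i : Int) :
    ∀ y ∈ pvSpan bs i, ∀ b ∈ bs, PySem.Int.bxor y b ∈ pvSpan bs i := by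
  induction bs with
  | nil => simp
  | cons c r ih =>
    intro y hy b hb
    simp only [pvSpan, List.mem_append, List.mem_map] at hy ⊢
    rcases List.mem_cons.mp hb with hb | hb
    · subst hb
      rcases hy with hy | ⟨z, hz, rfl⟩
      · exact Or.inr ⟨y, hy, rfl⟩
      · exact Or.inl (by rw [pvBxor_cancel]; exact hz)
    · rcases hy with hy | ⟨z, hz, rfl⟩
      · exact Or.inl (ih y hy b hb)
      · exact Or.inr ⟨PySem.Int.bxor z b, ih z hz b hb, (pvBxor_right_comm z c b).symm⟩

theorem pvNodup_subset_length {l l' : List Int} (h : l.Nodup) (hs : ∀ x ∈ l, x ∈ l') :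
    l.length ≤ l'.length := by
  calc l.length = l.toFinset.card := (List.toFinset_card_of_nodup h).symm
    _ ≤ l'.toFinset.card := Finset.card_le_card (by intro x hx; simp at hx ⊢; exact hs x hx)
    _ ≤ l'.length := l'.toFinset_card_le

-- ---------- proof-internal level-synchronous BFS (bridge between A and B) ----------
def pvLBtn (x : Int) (acc : PySem.Set Int × List Int) (b : Int) :
    PySem.Set Int × List Int :=
  let v := PySem.Int.bxor x b
  if v ∈ acc.1 then acc
  else (PySem.Set.add acc.1 v, acc.2 ++ [v])

def pvLStep (buttonsmsk : List Int) (x : Int) (acc : PySem.Set Int × List Int) :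
    PySem.Set Int × List Int :=
  buttonsmsk.foldl (pvLBtn x) acc

def pvLevelAux (targetmsk : Int) (buttonsmsk : List Int) :
    Nat → List Int → PySem.Set Int → Int → Option Int
  | 0, _, _, _ => none
  | fuel + 1, frontier, visited, depth =>
    if frontier = [] then none
    else if targetmsk ∈ frontier then some depth
    else
      let s := frontier.foldl (fun acc x => pvLStep buttonsmsk x acc) (visited, [])
      pvLevelAux targetmsk buttonsmsk fuel s.2 s.1 (depth + 1)

-- the dict part and the appended suffix of A's inner loop do not depend on the queue in front
theorem pvAStep_queue (bs : List Int) (x : Int) :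
    ∀ (q : List Int) (dist : PySem.Dict Int Int),
    bfsAStep bs x (q, dist) = (q ++ (bfsAStep bs x ([], dist)).1, (bfsAStep bs x ([], dist)).2) := by
  induction bs with
  | nil => intro q dist; simp [bfsAStep]
  | cons b bs ih =>
    intro q dist
    simp only [bfsAStep, List.foldl_cons] at *
    by_cases hv : (PySem.Dict.get? dist (PySem.Int.bxor x b)).isSome = true
    · simp only [bfsABtn, hv, if_true]
      exact ih q dist
    · simp only [bfsABtn, hv, if_false, Bool.false_eq_true]
      simp only [List.nil_append]
      rw [ih (q ++ [PySem.Int.bxor x b]) _, ih [PySem.Int.bxor x b] _]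
      simp

-- A's inner loop only inserts fresh keys: existing entries survive it
theorem pvAStep_preserve (bs : List Int) (x : Int) :
    ∀ (q : List Int) (dist : PySem.Dict Int Int) (y : Int) (c : Int),
    PySem.Dict.get? dist y = some c →
    PySem.Dict.get? (bfsAStep bs x (q, dist)).2 y = some c := by
  induction bs with
  | nil => intro q dist y c h; simpa [bfsAStep] using h
  | cons b bs ih =>
    intro q dist y c h
    simp only [bfsAStep, List.foldl_cons] at *
    by_cases hv : (PySem.Dict.get? dist (PySem.Int.bxor x b)).isSome = true
    · simp only [bfsABtn, hv, if_true]
      exact ih q dist y c h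
    · simp only [bfsABtn, hv, if_false, Bool.false_eq_true]
      apply ih
      have hy : y ≠ PySem.Int.bxor x b := by
        intro e
        rw [← e, h] at hv
        simp at hv
      rw [PySem.Dict.get?_insert_of_ne _ _ hy]
      exact h

-- one node expanded: A's inner loop and the level inner loop discover the same fresh states, in order
theorem pvStep_sim (S : List Int) :
    ∀ (bs : List Int), (∀ y ∈ S, ∀ b ∈ bs, PySem.Int.bxor y b ∈ S) →
    ∀ (x : Int) (pA : List Int) (dist : PySem.Dict Int Int) (vis nxt : List Int) (d : Int),
    (∀ v : Int, (PySem.Dict.get? dist v).isSome = true ↔ v ∈ vis) →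
    PySem.Dict.get? dist x = some d →
    x ∈ S →
    vis.Nodup →
    ∃ (Δ : List Int) (dist' : PySem.Dict Int Int),
      bfsAStep bs x (pA, dist) = (pA ++ Δ, dist') ∧
      pvLStep bs x (vis, nxt) = (vis ++ Δ, nxt ++ Δ) ∧
      (∀ v : Int, (PySem.Dict.get? dist' v).isSome = true ↔ v ∈ vis ++ Δ) ∧
      (∀ y c, PySem.Dict.get? dist y = some c → PySem.Dict.get? dist' y = some c) ∧
      (∀ y ∈ Δ, PySem.Dict.get? dist' y = some (d + 1)) ∧
      (∀ y ∈ Δ, y ∈ S) ∧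
      (vis ++ Δ).Nodup ∧
      (∀ y : Int, y ∈ vis ++ Δ ↔ y ∈ vis ∨ ∃ b ∈ bs, y = PySem.Int.bxor x b) := by
  intro bs
  induction bs with
  | nil =>
    intro _ x pA dist vis nxt d hsync hx hxS hnd
    exact ⟨[], dist, by simp [bfsAStep], by simp [pvLStep], by simpa using hsync,
      fun y c h => h, by simp, by simp, by simpa using hnd, by simp⟩
  | cons b bs ih =>
    intro hS x pA dist vis nxt d hsync hx hxS hnd
    have hS' : ∀ y ∈ S, ∀ c ∈ bs, PySem.Int.bxor y c ∈ S :=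
      fun y hy c hc => hS y hy c (List.mem_cons_of_mem _ hc)
    by_cases hv : (PySem.Dict.get? dist (PySem.Int.bxor x b)).isSome = true
    · have hvvis : PySem.Int.bxor x b ∈ vis := (hsync _).mp hv
      obtain ⟨Δ, dist', h1, h2, h3, h4, h5, h6, h7, h8⟩ := ih hS' x pA dist vis nxt d hsync hx hxS hnd
      refine ⟨Δ, dist', ?_, ?_, h3, h4, h5, h6, h7, ?_⟩
      · simpa [bfsAStep, List.foldl_cons, bfsABtn, hv] using h1
      · simpa [pvLStep, List.foldl_cons, pvLBtn, hvvis] using h2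
      · intro y
        rw [h8 y]
        constructor
        · rintro (h | ⟨b', hb', rfl⟩)
          · exact Or.inl h
          · exact Or.inr ⟨b', List.mem_cons_of_mem _ hb', rfl⟩
        · rintro (h | ⟨b', hb', rfl⟩)
          · exact Or.inl h
          · rcases List.mem_cons.mp hb' with rfl | hb'
            · exact Or.inl hvvis
            · exact Or.inr ⟨b', hb', rfl⟩
    · have hvn : PySem.Dict.get? dist (PySem.Int.bxor x b) = none := by
        cases h : PySem.Dict.get? dist (PySem.Int.bxor x b) with
        | none => rfl
        | some c => rw [h] at hv; simp at hv
      have hvvis : PySem.Int.bxor x b ∉ vis := fun h => hv ((hsync _).mpr h)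
      have hxne : x ≠ PySem.Int.bxor x b := by
        intro e; rw [← e, hx] at hvn; cases hvn
      have hgetD : PySem.Dict.getD dist x 0 = d := by
        rw [PySem.Dict.getD_eq_get?_getD, hx]; rfl
      have hsync₁ : ∀ w : Int,
          (PySem.Dict.get? (PySem.Dict.insert dist (PySem.Int.bxor x b) (d + 1)) w).isSome = true
            ↔ w ∈ vis ++ [PySem.Int.bxor x b] := by
        intro w
        rw [PySem.Dict.get?_insert]
        by_cases hw : w = PySem.Int.bxor x b
        · simp [hw]
        · simp [hw, hsync w]
      have hx₁ : PySem.Dict.get? (PySem.Dict.insert dist (PySem.Int.bxor x b) (d + 1)) x = some d := by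
        rw [PySem.Dict.get?_insert_of_ne _ _ hxne]; exact hx
      have hnd₁ : (vis ++ [PySem.Int.bxor x b]).Nodup :=
        List.Nodup.append hnd (List.nodup_singleton _) (by
          intro a ha hb; simp at hb; subst hb; exact hvvis ha)
      obtain ⟨Δ', dist', h1, h2, h3, h4, h5, h6, h7, h8⟩ :=
        ih hS' x (pA ++ [PySem.Int.bxor x b])
          (PySem.Dict.insert dist (PySem.Int.bxor x b) (d + 1))
          (vis ++ [PySem.Int.bxor x b]) (nxt ++ [PySem.Int.bxor x b]) d hsync₁ hx₁ hxS hnd₁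
      have hAbtn : bfsABtn x (pA, dist) b
          = (pA ++ [PySem.Int.bxor x b], PySem.Dict.insert dist (PySem.Int.bxor x b) (d + 1)) := by
        simp [bfsABtn, hv, hgetD]
      have hBbtn : pvLBtn x (vis, nxt) b
          = (vis ++ [PySem.Int.bxor x b], nxt ++ [PySem.Int.bxor x b]) := by
        simp [pvLBtn, hvvis, PySem.Set.add, PySem.Set.contains]
      refine ⟨PySem.Int.bxor x b :: Δ', dist', ?_, ?_, ?_, ?_, ?_, ?_, ?_, ?_⟩
      · simp only [bfsAStep, List.foldl_cons, hAbtn] at h1 ⊢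
        rw [h1]; simp
      · simp only [pvLStep, List.foldl_cons, hBbtn] at h2 ⊢
        rw [h2]; simp
      · intro v; rw [h3 v]; simp [List.mem_append]
      · intro y c h
        apply h4
        have hy : y ≠ PySem.Int.bxor x b := by
          intro e; rw [← e, h] at hvn; cases hvn
        rw [PySem.Dict.get?_insert_of_ne _ _ hy]; exact h
      · intro y hy
        rcases List.mem_cons.mp hy with rfl | hy
        · exact h4 _ _ (PySem.Dict.get?_insert_self _ _ _)
        · exact h5 y hy
      · intro y hy
        rcases List.mem_cons.mp hy with rfl | hy
        · exact hS x hxS b (List.mem_cons_self ..)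
        · exact h6 y hy
      · simpa [List.append_assoc] using h7
      · intro y
        have hmem : y ∈ vis ++ (PySem.Int.bxor x b :: Δ')
            ↔ y ∈ (vis ++ [PySem.Int.bxor x b]) ++ Δ' := by
          simp [List.mem_append, List.mem_cons]
        rw [hmem, h8 y]
        simp only [List.mem_append, List.mem_cons, List.not_mem_nil, or_false]
        constructor
        · rintro ((h | h) | ⟨b', hb', rfl⟩)
          · exact Or.inl h
          · exact Or.inr ⟨b, Or.inl rfl, h⟩
          · exact Or.inr ⟨b', Or.inr hb', rfl⟩
        · rintro (h | ⟨b', (rfl | hb'), rfl⟩)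
          · exact Or.inl (Or.inl h)
          · exact Or.inl (Or.inr rfl)
          · exact Or.inr ⟨b', hb', rfl⟩

-- one whole level expanded
theorem pvLevel_sim (buttons S : List Int)
    (hS : ∀ y ∈ S, ∀ b ∈ buttons, PySem.Int.bxor y b ∈ S) :
    ∀ (f pA : List Int) (dist : PySem.Dict Int Int) (vis nxt : List Int) (d : Int),
    (∀ v : Int, (PySem.Dict.get? dist v).isSome = true ↔ v ∈ vis) →
    (∀ y ∈ f, PySem.Dict.get? dist y = some d) →
    (∀ y ∈ f, y ∈ S) →
    vis.Nodup →
    ∃ (Δ : List Int) (dist' : PySem.Dict Int Int),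
      f.foldl (fun a x => bfsAStep buttons x a) (pA, dist) = (pA ++ Δ, dist') ∧
      f.foldl (fun a x => pvLStep buttons x a) (vis, nxt) = (vis ++ Δ, nxt ++ Δ) ∧
      (∀ v : Int, (PySem.Dict.get? dist' v).isSome = true ↔ v ∈ vis ++ Δ) ∧
      (∀ y c, PySem.Dict.get? dist y = some c → PySem.Dict.get? dist' y = some c) ∧
      (∀ y ∈ Δ, PySem.Dict.get? dist' y = some (d + 1)) ∧
      (∀ y ∈ Δ, y ∈ S) ∧
      (vis ++ Δ).Nodup ∧
      (∀ y : Int, y ∈ vis ++ Δ ↔ y ∈ vis ∨ ∃ x ∈ f, ∃ b ∈ buttons, y = PySem.Int.bxor x b) := by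
  intro f
  induction f with
  | nil =>
    intro pA dist vis nxt d hsync _ _ hnd
    exact ⟨[], dist, by simp, by simp, by simpa using hsync, fun y c h => h,
      by simp, by simp, by simpa using hnd, by simp⟩
  | cons x f ih =>
    intro pA dist vis nxt d hsync hfd hfS hnd
    obtain ⟨Δ₁, dist₁, h1, h2, h3, h4, h5, h6, h7, h8⟩ :=
      pvStep_sim S buttons hS x pA dist vis nxt d hsync
        (hfd x (List.mem_cons_self ..)) (hfS x (List.mem_cons_self ..)) hnd
    obtain ⟨Δ₂, dist', g1, g2, g3, g4, g5, g6, g7, g8⟩ :=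
      ih (pA ++ Δ₁) dist₁ (vis ++ Δ₁) (nxt ++ Δ₁) d h3
        (fun y hy => h4 y d (hfd y (List.mem_cons_of_mem _ hy)))
        (fun y hy => hfS y (List.mem_cons_of_mem _ hy)) h7
    refine ⟨Δ₁ ++ Δ₂, dist', ?_, ?_, ?_, ?_, ?_, ?_, ?_, ?_⟩
    · rw [List.foldl_cons]
      show List.foldl _ (bfsAStep buttons x (pA, dist)) f = _
      rw [h1]
      show (f.foldl (fun a x => bfsAStep buttons x a) (pA ++ Δ₁, dist₁)) = _
      rw [g1, List.append_assoc]
    · rw [List.foldl_cons]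
      show List.foldl _ (pvLStep buttons x (vis, nxt)) f = _
      rw [h2]
      show (f.foldl (fun a x => pvLStep buttons x a) (vis ++ Δ₁, nxt ++ Δ₁)) = _
      rw [g2, List.append_assoc, List.append_assoc]
    · intro v; rw [g3 v, List.append_assoc]
    · exact fun y c h => g4 y c (h4 y c h)
    · intro y hy
      rcases List.mem_append.mp hy with hy | hy
      · exact g4 y (d + 1) (h5 y hy)
      · exact g5 y hy
    · intro y hy
      rcases List.mem_append.mp hy with hy | hy
      · exact h6 y hy
      · exact g6 y hy
    · simpa [List.append_assoc] using g7
    · intro y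
      have hmem : y ∈ vis ++ (Δ₁ ++ Δ₂) ↔ y ∈ (vis ++ Δ₁) ++ Δ₂ := by
        simp [List.mem_append]
      rw [hmem, g8 y, h8 y]
      constructor
      · rintro ((h | ⟨b', hb', rfl⟩) | ⟨x', hx', hrest⟩)
        · exact Or.inl h
        · exact Or.inr ⟨x, List.mem_cons_self .., b', hb', rfl⟩
        · exact Or.inr ⟨x', List.mem_cons_of_mem _ hx', hrest⟩
      · rintro (h | ⟨x', hx', b', hb', rfl⟩)
        · exact Or.inl (Or.inl h)
        · rcases List.mem_cons.mp hx' with rfl | hx'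
          · exact Or.inl (Or.inr ⟨b', hb', rfl⟩)
          · exact Or.inr ⟨x', hx', b', hb', rfl⟩

-- A pops a whole level of non-target nodes: this is exactly a fold of its inner loop
theorem pvA_run_level (target : Int) (buttons : List Int) :
    ∀ (f : List Int) (fA : Nat) (p : List Int) (dist : PySem.Dict Int Int),
    (∀ y ∈ f, y ≠ target) →
    bfsAux target buttons (fA + f.length) (f ++ p) dist
      = bfsAux target buttons fA
          (f.foldl (fun a x => bfsAStep buttons x a) (p, dist)).1
          (f.foldl (fun a x => bfsAStep buttons x a) (p, dist)).2 := by
  intro f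
  induction f with
  | nil => intro fA p dist _; simp
  | cons x f ih =>
    intro fA p dist hne
    have hx : x ≠ target := hne x (List.mem_cons_self ..)
    have hfuel : fA + (x :: f).length = (fA + f.length) + 1 := by simp; ring
    rw [hfuel]
    show bfsAux target buttons ((fA + f.length) + 1) (x :: (f ++ p)) dist = _
    simp only [bfsAux, if_neg hx]
    rw [show bfsAStep buttons x (f ++ p, dist)
        = (f ++ (p ++ (bfsAStep buttons x ([], dist)).1), (bfsAStep buttons x ([], dist)).2) from by
      rw [pvAStep_queue, List.append_assoc]]
    rw [ih fA (p ++ (bfsAStep buttons x ([], dist)).1) (bfsAStep buttons x ([], dist)).2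
      (fun y hy => hne y (List.mem_cons_of_mem _ hy))]
    rw [List.foldl_cons]
    show _ = bfsAux target buttons fA
      ((List.foldl _ (bfsAStep buttons x (p, dist)) f).1)
      ((List.foldl _ (bfsAStep buttons x (p, dist)) f).2)
    conv_rhs => rw [pvAStep_queue]

-- if the target sits in the current level, A returns that level's distance
theorem pvA_find (target : Int) (buttons : List Int) :
    ∀ (f : List Int) (fA : Nat) (p : List Int) (dist : PySem.Dict Int Int) (d : Int),
    target ∈ f →
    (∀ y ∈ f, PySem.Dict.get? dist y = some d) →
    f.length ≤ fA →
    bfsAux target buttons fA (f ++ p) dist = some d := by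
  intro f
  induction f with
  | nil => intro fA p dist d h; simp at h
  | cons x f ih =>
    intro fA p dist d htf hfd hlen
    obtain ⟨fA', rfl⟩ : ∃ fA', fA = fA' + 1 := ⟨fA - 1, by simp at hlen; omega⟩
    show bfsAux target buttons (fA' + 1) (x :: (f ++ p)) dist = some d
    by_cases hx : x = target
    · simp only [bfsAux, if_pos hx]
      exact hfd x (List.mem_cons_self ..)
    · have htf' : target ∈ f := by
        rcases List.mem_cons.mp htf with e | h
        · exact absurd e.symm hx
        · exact h
      simp only [bfsAux, if_neg hx]
      rw [show bfsAStep buttons x (f ++ p, dist)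
          = (f ++ (p ++ (bfsAStep buttons x ([], dist)).1), (bfsAStep buttons x ([], dist)).2) from by
        rw [pvAStep_queue, List.append_assoc]]
      exact ih fA' (p ++ (bfsAStep buttons x ([], dist)).1) (bfsAStep buttons x ([], dist)).2 d htf'
        (fun y hy => pvAStep_preserve buttons x [] dist y d (hfd y (List.mem_cons_of_mem _ hy)))
        (by simp at hlen; omega)

-- main simulation: at a level boundary, A's queue BFS and the level BFS agree
theorem pvSim (target : Int) (buttons S : List Int)
    (hS : ∀ y ∈ S, ∀ b ∈ buttons, PySem.Int.bxor y b ∈ S) :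
    ∀ (fB : Nat) (q : List Int) (dist : PySem.Dict Int Int) (vis : List Int) (d : Int) (fA : Nat),
    (∀ v : Int, (PySem.Dict.get? dist v).isSome = true ↔ v ∈ vis) →
    (∀ y ∈ q, PySem.Dict.get? dist y = some d) →
    (target ∈ vis → target ∈ q) →
    (∀ y ∈ vis, y ∈ S) →
    (∀ y ∈ q, y ∈ S) →
    vis.Nodup →
    q.length + (S.length - vis.length) + 1 ≤ fA →
    (S.length - vis.length) + 2 ≤ fB →
    bfsAux target buttons fA q dist = pvLevelAux target buttons fB q vis d := by
  intro fB
  induction fB with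
  | zero =>
    intro q dist vis d fA _ _ _ _ _ _ _ hfB
    omega
  | succ fB ih =>
    intro q dist vis d fA hsync hqd htgt hvS hqS hnd hfA hfB
    match q with
    | [] =>
      obtain ⟨fA', rfl⟩ : ∃ fA', fA = fA' + 1 := ⟨fA - 1, by omega⟩
      simp [bfsAux, pvLevelAux]
    | x :: q' =>
      by_cases htq : target ∈ x :: q'
      · have hB : pvLevelAux target buttons (fB + 1) (x :: q') vis d = some d := by
          simp [pvLevelAux, htq]
        rw [hB]
        have hA := pvA_find target buttons (x :: q') fA [] dist d htq hqd
          (by simp at hfA ⊢; omega)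
        simpa using hA
      · have htq' : ∀ y ∈ x :: q', y ≠ target := fun y hy e => htq (e ▸ hy)
        obtain ⟨Δ, dist', hA1, hB1, hsync', hpres, hΔd, hΔS, hnd', _⟩ :=
          pvLevel_sim buttons S hS (x :: q') [] dist vis [] d hsync hqd hqS hnd
        have hA : bfsAux target buttons fA (x :: q') dist
            = bfsAux target buttons (fA - (x :: q').length) Δ dist' := by
          have h := pvA_run_level target buttons (x :: q') (fA - (x :: q').length) [] dist htq'
          rw [List.append_nil,
            show fA - (x :: q').length + (x :: q').length = fA from by simp at hfA ⊢; omega,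
            hA1] at h
          simpa using h
        have hB : pvLevelAux target buttons (fB + 1) (x :: q') vis d
            = pvLevelAux target buttons fB Δ (vis ++ Δ) (d + 1) := by
          show (if (x :: q') = [] then none else if target ∈ x :: q' then some d else _) = _
          rw [if_neg (by simp), if_neg htq]
          show pvLevelAux target buttons fB
            ((x :: q').foldl (fun acc x => pvLStep buttons x acc) (vis, [])).2
            ((x :: q').foldl (fun acc x => pvLStep buttons x acc) (vis, [])).1 (d + 1) = _
          rw [hB1]
          simp
        rw [hA, hB]
        by_cases hΔ : Δ = []
        · subst hΔ
          obtain ⟨fA'', hfa⟩ : ∃ fA'', fA - (x :: q').length = fA'' + 1 :=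
            ⟨fA - (x :: q').length - 1, by simp at hfA ⊢; omega⟩
          obtain ⟨fB', rfl⟩ : ∃ fB', fB = fB' + 1 := ⟨fB - 1, by omega⟩
          rw [hfa]
          simp [bfsAux, pvLevelAux]
        · have hlen : (vis ++ Δ).length ≤ S.length :=
            pvNodup_subset_length hnd' (by
              intro y hy
              rcases List.mem_append.mp hy with hy | hy
              · exact hvS y hy
              · exact hΔS y hy)
          have hΔlen : 1 ≤ Δ.length := by
            cases Δ with
            | nil => exact absurd rfl hΔ
            | cons a l => simp
          simp only [List.length_append] at hlen
          apply ih Δ dist' (vis ++ Δ) (d + 1) (fA - (x :: q').length) hsync' hΔd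
          · intro h
            rcases List.mem_append.mp h with h | h
            · exact absurd (htgt h) htq
            · exact h
          · intro y hy
            rcases List.mem_append.mp hy with hy | hy
            · exact hvS y hy
            · exact hΔS y hy
          · exact hΔS
          · exact hnd'
          · simp only [List.length_append, List.length_cons]
            simp at hfA
            omega
          · simp only [List.length_append]
            omega

-- A equals the level-synchronous BFS started at depth 0
theorem pvA_eq_level (initmsk targetmsk : Int) (buttonsmsk : List Int) :
    bfs initmsk targetmsk buttonsmsk
      = pvLevelAux targetmsk buttonsmsk (2 ^ buttonsmsk.length + 1) [initmsk] [initmsk] 0 := by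
  unfold bfs
  have hget : ∀ v : Int, PySem.Dict.get? (PySem.Dict.ofList [(initmsk, (0 : Int))]) v
      = if v = initmsk then some 0 else none := by
    intro v
    simp [PySem.Dict.ofList, PySem.Dict.update, PySem.Dict.get?_insert]
  have hlen := pvSpan_length buttonsmsk initmsk
  have hpow : 1 ≤ 2 ^ buttonsmsk.length := Nat.one_le_two_pow
  refine pvSim targetmsk buttonsmsk (pvSpan buttonsmsk initmsk)
    (fun y hy b hb => pvSpan_closed buttonsmsk initmsk y hy b hb)
    (2 ^ buttonsmsk.length + 1) [initmsk] _ [initmsk] 0 (2 ^ buttonsmsk.length + 1)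
    ?_ ?_ ?_ ?_ ?_ ?_ ?_ ?_
  · intro v
    rw [hget v]
    by_cases hv : v = initmsk <;> simp [hv]
  · intro y hy
    simp at hy
    rw [hget, if_pos hy]
  · exact fun h => h
  · intro y hy
    simp at hy
    subst hy
    exact pvSpan_self _ _
  · intro y hy
    simp at hy
    subst hy
    exact pvSpan_self _ _
  · simp
  · simp [hlen]
    omega
  · simp [hlen]

-- ---------- xor of a list of presses; distances measured by press sequences ----------
def pvXorl : List Int → Int
  | [] => 0
  | b :: l => PySem.Int.bxor b (pvXorl l)

theorem pvXorl_perm {l l' : List Int} (h : l.Perm l') : pvXorl l = pvXorl l' := by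
  induction h with
  | nil => rfl
  | cons x _ ih => simp only [pvXorl, ih]
  | swap x y l =>
    show PySem.Int.bxor y (PySem.Int.bxor x (pvXorl l))
        = PySem.Int.bxor x (PySem.Int.bxor y (pvXorl l))
    rw [← pvBxor_assoc, ← pvBxor_assoc, PySem.Int.bxor_comm y x]
  | trans _ _ ih1 ih2 => rw [ih1, ih2]

theorem pvXorl_cons_init (i b : Int) (l : List Int) :
    PySem.Int.bxor i (pvXorl (b :: l)) = PySem.Int.bxor (PySem.Int.bxor i (pvXorl l)) b := by
  show PySem.Int.bxor i (PySem.Int.bxor b (pvXorl l)) = _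
  rw [← pvBxor_assoc, pvBxor_right_comm]

-- 'v is reachable from i in at most d presses'
def pvGDle (i : Int) (bs : List Int) (d : Nat) (v : Int) : Prop :=
  ∃ l : List Int, (∀ x ∈ l, x ∈ bs) ∧ l.length ≤ d ∧ PySem.Int.bxor i (pvXorl l) = v

-- 'the BFS distance of v from i is exactly d'
def pvMD (i : Int) (bs : List Int) (d : Nat) (v : Int) : Prop :=
  pvGDle i bs d v ∧ ∀ e, e < d → ¬ pvGDle i bs e v

theorem pvGDle_mono {i : Int} {bs : List Int} {d e : Nat} {v : Int}
    (h : pvGDle i bs d v) (hde : d ≤ e) : pvGDle i bs e v := by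
  obtain ⟨l, h1, h2, h3⟩ := h
  exact ⟨l, h1, le_trans h2 hde, h3⟩

theorem pvGDle_zero (i : Int) (bs : List Int) (v : Int) : pvGDle i bs 0 v ↔ v = i := by
  constructor
  · rintro ⟨l, _, hlen, hx⟩
    have : l = [] := List.eq_nil_of_length_eq_zero (Nat.le_zero.mp hlen)
    subst this
    rw [← hx]
    show PySem.Int.bxor i 0 = i
    rw [PySem.Int.bxor_zero]
  · rintro rfl
    exact ⟨[], by simp, Nat.le_refl _, by show PySem.Int.bxor v 0 = v; rw [PySem.Int.bxor_zero]⟩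

theorem pvGDle_step {i : Int} {bs : List Int} {d : Nat} {x b : Int}
    (h : pvGDle i bs d x) (hb : b ∈ bs) : pvGDle i bs (d + 1) (PySem.Int.bxor x b) := by
  obtain ⟨l, h1, h2, h3⟩ := h
  refine ⟨b :: l, ?_, by simpa using h2, ?_⟩
  · intro y hy
    rcases List.mem_cons.mp hy with rfl | hy
    · exact hb
    · exact h1 y hy
  · rw [pvXorl_cons_init, h3]

theorem pvMinEx {i : Int} {bs : List Int} {v : Int} :
    ∀ k, pvGDle i bs k v → ∃ m, m ≤ k ∧ pvMD i bs m v := by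
  intro k
  induction k using Nat.strong_induction_on with
  | _ k ih =>
    intro hk
    by_cases h : ∃ e, e < k ∧ pvGDle i bs e v
    · obtain ⟨e, he, hge⟩ := h
      obtain ⟨m, hm, hmd⟩ := ih e he hge
      exact ⟨m, le_of_lt (lt_of_le_of_lt hm he), hmd⟩
    · push Not at h
      exact ⟨k, Nat.le_refl _, hk, fun e he hge => h e he hge⟩

theorem pvGDle_decomp {i : Int} {bs : List Int} {d : Nat} {y : Int}
    (h : pvGDle i bs (d + 1) y) (hn : ¬ pvGDle i bs d y) :
    ∃ x b, b ∈ bs ∧ y = PySem.Int.bxor x b ∧ pvMD i bs d x := by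
  obtain ⟨l, h1, h2, h3⟩ := h
  cases l with
  | nil =>
    exfalso
    apply hn
    refine pvGDle_mono ((pvGDle_zero i bs y).mpr ?_) (Nat.zero_le d)
    rw [← h3]
    show PySem.Int.bxor i 0 = i
    rw [PySem.Int.bxor_zero]
  | cons b l' =>
    have hb : b ∈ bs := h1 b (List.mem_cons_self ..)
    have hlen' : l'.length ≤ d := by simp at h2; omega
    have hgx : pvGDle i bs d (PySem.Int.bxor i (pvXorl l')) :=
      ⟨l', fun x hx => h1 x (List.mem_cons_of_mem _ hx), hlen', rfl⟩
    obtain ⟨m, hm, hmd⟩ := pvMinEx d hgx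
    have hy : y = PySem.Int.bxor (PySem.Int.bxor i (pvXorl l')) b := by
      rw [← h3, pvXorl_cons_init]
    have hmd' : m = d := by
      by_contra hne
      have hmlt : m < d := lt_of_le_of_ne hm hne
      have : pvGDle i bs (m + 1) y := by
        rw [hy]; exact pvGDle_step hmd.1 hb
      exact hn (pvGDle_mono this (by omega))
    subst hmd'
    exact ⟨PySem.Int.bxor i (pvXorl l'), b, hb, hy, hmd⟩

theorem pvMD_pred {i : Int} {bs : List Int} {d : Nat} {y : Int}
    (h : pvMD i bs (d + 1) y) : ∃ x, pvMD i bs d x := by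
  obtain ⟨x, b, _, _, hx⟩ := pvGDle_decomp h.1 (h.2 d (Nat.lt_succ_self d))
  exact ⟨x, hx⟩

theorem pvChain {i : Int} {bs : List Int} :
    ∀ (m : Nat) (v : Int), pvMD i bs m v → ∀ e, e ≤ m → ∃ x, pvMD i bs e x := by
  intro m
  induction m with
  | zero =>
    intro v hv e he
    exact ⟨v, Nat.le_zero.mp he ▸ hv⟩
  | succ m ih =>
    intro v hv e he
    rcases Nat.lt_or_ge e (m + 1) with hlt | hge
    · obtain ⟨x, hx⟩ := pvMD_pred hv
      exact ih x hx e (by omega)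
    · exact ⟨v, (by omega : e = m + 1) ▸ hv⟩

theorem pvGDle_span {i : Int} {bs : List Int} {d : Nat} {v : Int}
    (h : pvGDle i bs d v) : v ∈ pvSpan bs i := by
  obtain ⟨l, h1, hlen, h3⟩ := h
  subst h3
  clear hlen
  clear d
  induction l with
  | nil =>
    show PySem.Int.bxor i 0 ∈ _
    rw [PySem.Int.bxor_zero]
    exact pvSpan_self bs i
  | cons b l ih =>
    rw [pvXorl_cons_init]
    exact pvSpan_closed bs i _ (ih (fun x hx => h1 x (List.mem_cons_of_mem _ hx)))
      b (h1 b (List.mem_cons_self ..))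

-- a press sequence reduces to a sub-multiset of the buttons with the same xor (presses cancel in pairs)
theorem pvReduce : ∀ (n : Nat) (l bs : List Int), l.length ≤ n → (∀ x ∈ l, x ∈ bs) →
    ∃ l', List.Subperm l' bs ∧ l'.length ≤ l.length ∧ pvXorl l' = pvXorl l := by
  intro n
  induction n using Nat.strong_induction_on with
  | _ n ih =>
    intro l bs hlen hsub
    by_cases hnd : l.Nodup
    · exact ⟨l, List.subperm_of_subset hnd hsub, Nat.le_refl _, rfl⟩
    · obtain ⟨x, hx⟩ := List.exists_duplicate_iff_not_nodup.mpr hnd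
      have hx2 : 2 ≤ l.count x := List.duplicate_iff_two_le_count.mp hx
      have hxm : x ∈ l := List.count_pos_iff.mp (by omega)
      have hxm2 : x ∈ l.erase x := by
        rw [← List.count_pos_iff, List.count_erase_self]
        omega
      have hp : l.Perm (x :: x :: (l.erase x).erase x) :=
        (List.perm_cons_erase hxm).trans ((List.perm_cons_erase hxm2).cons x)
      have hxor : pvXorl l = pvXorl ((l.erase x).erase x) := by
        rw [pvXorl_perm hp]
        show PySem.Int.bxor x (PySem.Int.bxor x _) = _
        rw [pvBxor_cancel_left]
      have hlt : ((l.erase x).erase x).length + 2 = l.length := by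
        have := hp.length_eq
        simp at this
        omega
      have hsubt : ∀ y ∈ (l.erase x).erase x, y ∈ bs := fun y hy =>
        hsub y (hp.symm.subset (List.mem_cons_of_mem _ (List.mem_cons_of_mem _ hy)))
      have hn2 : 2 ≤ n := by
        have := List.count_le_length (l := l) (a := x)
        omega
      obtain ⟨l', h1, h2, h3⟩ := ih (n - 1) (by omega) ((l.erase x).erase x) bs (by omega) hsubt
      exact ⟨l', h1, by omega, by rw [h3, hxor]⟩

-- ---------- the minimum sub-multiset size, computed button by button (B's DP, mathematically) ----------
def pvOmin : Option Int → Option Int → Option Int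
  | none, y => y
  | some a, none => some a
  | some a, some b => some (min a b)

def pvStepO (F : Int → Option Int) (b : Int) : Int → Option Int :=
  fun w => pvOmin (F w) ((F (PySem.Int.bxor w b)).map (· + 1))

def pvMcF (F : Int → Option Int) : List Int → Int → Option Int
  | [], w => F w
  | b :: bs, w => pvMcF (pvStepO F b) bs w

def pvF0 : Int → Option Int := fun w => if w = 0 then some 0 else none

def pvMc (bs : List Int) (w : Int) : Option Int := pvMcF pvF0 bs w

theorem pvOmin_none_right (x : Option Int) : pvOmin x none = x := by
  cases x <;> rfl

theorem pvOmin_middle (x y z w : Option Int) :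
    pvOmin (pvOmin x y) (pvOmin z w) = pvOmin (pvOmin x z) (pvOmin y w) := by
  cases x <;> cases y <;> cases z <;> cases w <;> simp [pvOmin] <;> omega

theorem pvOmin_map_succ (x y : Option Int) :
    (pvOmin x y).map (· + 1) = pvOmin (x.map (· + 1)) (y.map (· + 1)) := by
  cases x <;> cases y <;> simp [pvOmin]

theorem pvMcF_congr {F G : Int → Option Int} (h : ∀ w, F w = G w) :
    ∀ (bs : List Int) (w : Int), pvMcF F bs w = pvMcF G bs w := by
  intro bs
  induction bs generalizing F G with
  | nil => intro w; exact h w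
  | cons b bs ih =>
    intro w
    show pvMcF (pvStepO F b) bs w = pvMcF (pvStepO G b) bs w
    exact ih (fun v => by unfold pvStepO; rw [h, h]) w

theorem pvStepO_comm (F : Int → Option Int) (b b' : Int) (w : Int) :
    pvStepO (pvStepO F b) b' w = pvStepO (pvStepO F b') b w := by
  unfold pvStepO
  rw [pvOmin_map_succ, pvOmin_map_succ, pvBxor_right_comm w b' b]
  exact pvOmin_middle _ _ _ _

theorem pvMcF_step : ∀ (bs : List Int) (F : Int → Option Int) (b : Int) (w : Int),
    pvMcF (pvStepO F b) bs w
      = pvOmin (pvMcF F bs w) ((pvMcF F bs (PySem.Int.bxor w b)).map (· + 1)) := by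
  intro bs
  induction bs with
  | nil => intro F b w; rfl
  | cons b' bs ih =>
    intro F b w
    show pvMcF (pvStepO (pvStepO F b) b') bs w = _
    rw [pvMcF_congr (pvStepO_comm F b b') bs w, ih (pvStepO F b') b w]
    rfl

theorem pvMc_cons (b : Int) (bs : List Int) (w : Int) :
    pvMc (b :: bs) w = pvOmin (pvMc bs w) ((pvMc bs (PySem.Int.bxor w b)).map (· + 1)) :=
  pvMcF_step bs pvF0 b w

theorem pvMc_achieve : ∀ (bs : List Int) (w : Int) (k : Int), pvMc bs w = some k →
    ∃ l, List.Subperm l bs ∧ (l.length : Int) = k ∧ pvXorl l = w := by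
  intro bs
  induction bs with
  | nil =>
    intro w k h
    unfold pvMc pvMcF pvF0 at h
    by_cases hw : w = 0
    · rw [if_pos hw] at h
      exact ⟨[], List.nil_subperm, by simpa using (Option.some.inj h),
        by rw [hw]; rfl⟩
    · rw [if_neg hw] at h; cases h
  | cons b bs ih =>
    intro w k h
    rw [pvMc_cons] at h
    cases hX : pvMc bs w with
    | some a =>
      cases hY : pvMc bs (PySem.Int.bxor w b) with
      | none =>
        rw [hX, hY] at h
        simp [pvOmin] at h
        obtain ⟨l, h1, h2, h3⟩ := ih w a hX
        exact ⟨l, h1.trans (List.sublist_cons_self b bs).subperm, h ▸ h2, h3⟩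
      | some c =>
        rw [hX, hY] at h
        simp [pvOmin] at h
        rcases le_total a (c + 1) with hle | hle
        · obtain ⟨l, h1, h2, h3⟩ := ih w a hX
          refine ⟨l, h1.trans (List.sublist_cons_self b bs).subperm, ?_, h3⟩
          rw [← h, min_eq_left hle, h2]
        · obtain ⟨l, h1, h2, h3⟩ := ih (PySem.Int.bxor w b) c hY
          refine ⟨b :: l, (List.subperm_cons b).mpr h1, ?_, ?_⟩
          · rw [← h, min_eq_right hle]
            simp [← h2]
          · show PySem.Int.bxor b (pvXorl l) = w
            rw [h3, PySem.Int.bxor_comm, pvBxor_cancel]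
    | none =>
      cases hY : pvMc bs (PySem.Int.bxor w b) with
      | none => rw [hX, hY] at h; cases h
      | some c =>
        rw [hX, hY] at h
        simp [pvOmin] at h
        obtain ⟨l, h1, h2, h3⟩ := ih (PySem.Int.bxor w b) c hY
        refine ⟨b :: l, (List.subperm_cons b).mpr h1, ?_, ?_⟩
        · rw [← h]; simp [← h2]
        · show PySem.Int.bxor b (pvXorl l) = w
          rw [h3, PySem.Int.bxor_comm, pvBxor_cancel]

theorem pvMc_le : ∀ (bs l : List Int) (w : Int), List.Subperm l bs → pvXorl l = w →
    ∃ k, pvMc bs w = some k ∧ k ≤ (l.length : Int) := by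
  intro bs
  induction bs with
  | nil =>
    intro l w hsp hx
    have : l = [] := List.subperm_nil.mp hsp
    subst this
    exact ⟨0, by rw [← hx]; rfl, by simp⟩
  | cons b bs ih =>
    intro l w hsp hx
    obtain ⟨u, hu, hsub⟩ := hsp
    rcases List.sublist_cons_iff.mp hsub with husub | ⟨r, rfl, hr⟩
    · obtain ⟨k, hk, hkle⟩ := ih l w ⟨u, hu, husub⟩ hx
      rw [pvMc_cons, hk]
      cases hY : pvMc bs (PySem.Int.bxor w b) with
      | none => exact ⟨k, rfl, hkle⟩
      | some c => exact ⟨min k (c + 1), rfl, le_trans (min_le_left _ _) hkle⟩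
    · have hxr : pvXorl r = PySem.Int.bxor w b := by
        have : pvXorl l = PySem.Int.bxor b (pvXorl r) := (pvXorl_perm hu).symm
        rw [hx] at this
        rw [PySem.Int.bxor_comm, this, pvBxor_cancel_left]
      obtain ⟨k, hk, hkle⟩ := ih r (PySem.Int.bxor w b) ⟨r, List.Perm.refl r, hr⟩ hxr
      have hlen : l.length = r.length + 1 := by
        have := hu.length_eq
        simp at this
        omega
      rw [pvMc_cons, hk]
      cases hX : pvMc bs w with
      | none =>
        refine ⟨k + 1, by simp [pvOmin], ?_⟩
        rw [hlen]
        push_cast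
        omega
      | some a =>
        refine ⟨min a (k + 1), by simp [pvOmin], ?_⟩
        have : (min a (k + 1)) ≤ k + 1 := min_le_right _ _
        rw [hlen]
        push_cast
        omega

-- found at level d: the DP value at initmsk ^ targetmsk is exactly d
theorem pvFound {i t : Int} {bs : List Int} {d : Nat} (h : pvMD i bs d t) :
    pvMc bs (PySem.Int.bxor i t) = some (d : Int) := by
  obtain ⟨⟨l, hsub, hlen, hxl⟩, hmin⟩ := h
  have hw : pvXorl l = PySem.Int.bxor i t := by
    rw [← hxl, pvBxor_cancel_left]
  obtain ⟨l', hsp, hlen', hxl'⟩ := pvReduce l.length l bs (Nat.le_refl _) hsub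
  obtain ⟨k, hk, hkle⟩ := pvMc_le bs l' (PySem.Int.bxor i t) hsp (by rw [hxl', hw])
  obtain ⟨lk, hlksp, hlklen, hlkx⟩ := pvMc_achieve bs (PySem.Int.bxor i t) k hk
  have hglk : pvGDle i bs lk.length t :=
    ⟨lk, fun x hx => hlksp.subset hx, Nat.le_refl _, by rw [hlkx, pvBxor_cancel_left]⟩
  have hdle : d ≤ lk.length := by
    by_contra hlt
    exact hmin lk.length (by omega) hglk
  rw [hk]
  congr 1
  omega

-- no level-d node at all, target never seen before: the state space is exhausted, the DP misses too
theorem pvUnreachable {i t : Int} {bs : List Int} {d : Nat}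
    (hempty : ∀ x, ¬ pvMD i bs d x) (htgt : ∀ e, e < d → ¬ pvGDle i bs e t) :
    pvMc bs (PySem.Int.bxor i t) = none := by
  cases h : pvMc bs (PySem.Int.bxor i t) with
  | none => rfl
  | some k =>
    exfalso
    obtain ⟨lk, hlksp, _, hlkx⟩ := pvMc_achieve bs (PySem.Int.bxor i t) k h
    have hglk : pvGDle i bs lk.length t :=
      ⟨lk, fun x hx => hlksp.subset hx, Nat.le_refl _, by rw [hlkx, pvBxor_cancel_left]⟩
    obtain ⟨m, _, hmd⟩ := pvMinEx lk.length hglk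
    have hdm : d ≤ m := by
      by_contra hlt
      exact htgt m (by omega) hmd.1
    obtain ⟨x, hx⟩ := pvChain m t hmd d hdm
    exact hempty x hx

-- ---------- pure characterisation of one level-BFS expansion ----------
theorem pvLBtn_fold (x : Int) :
    ∀ (bs : List Int) (vis nxt : List Int),
    ∃ Δ : List Int,
      bs.foldl (pvLBtn x) (vis, nxt) = (vis ++ Δ, nxt ++ Δ) ∧
      (∀ y : Int, y ∈ vis ++ Δ ↔ y ∈ vis ∨ ∃ b ∈ bs, y = PySem.Int.bxor x b) ∧
      (vis.Nodup → (vis ++ Δ).Nodup) := by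
  intro bs
  induction bs with
  | nil =>
    intro vis nxt
    exact ⟨[], by simp, by simp, fun h => by simpa using h⟩
  | cons b bs ih =>
    intro vis nxt
    rw [List.foldl_cons]
    by_cases hv : PySem.Int.bxor x b ∈ vis
    · have hb : pvLBtn x (vis, nxt) b = (vis, nxt) := by simp [pvLBtn, hv]
      obtain ⟨Δ, h1, h2, h3⟩ := ih vis nxt
      rw [hb]
      refine ⟨Δ, h1, ?_, h3⟩
      intro y
      rw [h2 y]
      constructor
      · rintro (h | ⟨b', hb', rfl⟩)
        · exact Or.inl h
        · exact Or.inr ⟨b', List.mem_cons_of_mem _ hb', rfl⟩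
      · rintro (h | ⟨b', hb', rfl⟩)
        · exact Or.inl h
        · rcases List.mem_cons.mp hb' with rfl | hb'
          · exact Or.inl hv
          · exact Or.inr ⟨b', hb', rfl⟩
    · have hb : pvLBtn x (vis, nxt) b
          = (vis ++ [PySem.Int.bxor x b], nxt ++ [PySem.Int.bxor x b]) := by
        simp [pvLBtn, hv, PySem.Set.add, PySem.Set.contains]
      obtain ⟨Δ', h1, h2, h3⟩ := ih (vis ++ [PySem.Int.bxor x b]) (nxt ++ [PySem.Int.bxor x b])
      rw [hb]
      refine ⟨PySem.Int.bxor x b :: Δ', ?_, ?_, ?_⟩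
      · rw [h1]; simp
      · intro y
        have hmem : y ∈ vis ++ (PySem.Int.bxor x b :: Δ')
            ↔ y ∈ (vis ++ [PySem.Int.bxor x b]) ++ Δ' := by
          simp [List.mem_append, List.mem_cons]
        rw [hmem, h2 y]
        simp only [List.mem_append, List.mem_cons, List.not_mem_nil, or_false]
        constructor
        · rintro ((h | h) | ⟨b', hb', rfl⟩)
          · exact Or.inl h
          · exact Or.inr ⟨b, Or.inl rfl, h⟩
          · exact Or.inr ⟨b', Or.inr hb', rfl⟩
        · rintro (h | ⟨b', (rfl | hb'), rfl⟩)
          · exact Or.inl (Or.inl h)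
          · exact Or.inl (Or.inr rfl)
          · exact Or.inr ⟨b', hb', rfl⟩
      · intro hnd
        have hnd₁ : (vis ++ [PySem.Int.bxor x b]).Nodup :=
          List.Nodup.append hnd (List.nodup_singleton _) (by
            intro a ha hb'; simp at hb'; subst hb'; exact hv ha)
        have := h3 hnd₁
        simpa [List.append_assoc] using this

theorem pvLevel_fold (bs : List Int) :
    ∀ (f vis nxt : List Int),
    ∃ Δ : List Int,
      f.foldl (fun a x => pvLStep bs x a) (vis, nxt) = (vis ++ Δ, nxt ++ Δ) ∧
      (∀ y : Int, y ∈ vis ++ Δ ↔ y ∈ vis ∨ ∃ x ∈ f, ∃ b ∈ bs, y = PySem.Int.bxor x b) ∧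
      (vis.Nodup → (vis ++ Δ).Nodup) := by
  intro f
  induction f with
  | nil =>
    intro vis nxt
    exact ⟨[], by simp, by simp, fun h => by simpa using h⟩
  | cons x f ih =>
    intro vis nxt
    rw [List.foldl_cons]
    obtain ⟨Δ₁, h1, h2, h3⟩ := pvLBtn_fold x bs vis nxt
    show ∃ Δ, f.foldl (fun a x => pvLStep bs x a) (pvLStep bs x (vis, nxt)) = _ ∧ _
    rw [show pvLStep bs x (vis, nxt) = (vis ++ Δ₁, nxt ++ Δ₁) from h1]
    obtain ⟨Δ₂, g1, g2, g3⟩ := ih (vis ++ Δ₁) (nxt ++ Δ₁)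
    refine ⟨Δ₁ ++ Δ₂, ?_, ?_, ?_⟩
    · rw [g1]; simp [List.append_assoc]
    · intro y
      have hmem : y ∈ vis ++ (Δ₁ ++ Δ₂) ↔ y ∈ (vis ++ Δ₁) ++ Δ₂ := by
        simp [List.mem_append]
      rw [hmem, g2 y, h2 y]
      constructor
      · rintro ((h | ⟨b', hb', rfl⟩) | ⟨x', hx', hrest⟩)
        · exact Or.inl h
        · exact Or.inr ⟨x, List.mem_cons_self .., b', hb', rfl⟩
        · exact Or.inr ⟨x', List.mem_cons_of_mem _ hx', hrest⟩
      · rintro (h | ⟨x', hx', b', hb', rfl⟩)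
        · exact Or.inl (Or.inl h)
        · rcases List.mem_cons.mp hx' with rfl | hx'
          · exact Or.inl (Or.inr ⟨b', hb', rfl⟩)
          · exact Or.inr ⟨x', hx', b', hb', rfl⟩
    · intro hnd
      have := g3 (h3 hnd)
      simpa [List.append_assoc] using this

-- ---------- the level BFS computes exactly the DP's minimum ----------
theorem pvLevelDP (i t : Int) (bs : List Int) :
    ∀ (fB : Nat) (f vis : List Int) (dN : Nat),
    (∀ v, v ∈ f ↔ pvMD i bs dN v) →
    (∀ v, v ∈ vis ↔ pvGDle i bs dN v) →
    (∀ e, e < dN → ¬ pvGDle i bs e t) →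
    vis.Nodup →
    (pvSpan bs i).length - vis.length + 2 ≤ fB →
    pvLevelAux t bs fB f vis (dN : Int) = pvMc bs (PySem.Int.bxor i t) := by
  intro fB
  induction fB with
  | zero =>
    intro f vis dN _ _ _ _ hfB
    omega
  | succ fB ih =>
    intro f vis dN hf hvis htgt hnd hfB
    show (if f = [] then none else if t ∈ f then some (dN : Int) else _) = _
    by_cases hfe : f = []
    · rw [if_pos hfe]
      refine (pvUnreachable ?_ htgt).symm
      intro x hx
      rw [hfe] at hf
      exact (List.not_mem_nil (a := x)).elim ((hf x).mpr hx)
    · rw [if_neg hfe]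
      by_cases htf : t ∈ f
      · rw [if_pos htf]
        exact (pvFound ((hf t).mp htf)).symm
      · rw [if_neg htf]
        have hntd : ¬ pvGDle i bs dN t := by
          intro hg
          obtain ⟨m, hm, hmd⟩ := pvMinEx dN hg
          rcases Nat.lt_or_ge m dN with hlt | hge
          · exact htgt m hlt hmd.1
          · exact htf ((hf t).mpr ((by omega : m = dN) ▸ hmd))
        have htgt' : ∀ e, e < dN + 1 → ¬ pvGDle i bs e t := by
          intro e he
          rcases Nat.lt_or_ge e dN with hlt | hge
          · exact htgt e hlt
          · exact (by omega : e = dN) ▸ hntd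
        obtain ⟨Δ, hfold, hmem, hndf⟩ := pvLevel_fold bs f vis []
        have hnd' := hndf hnd
        have hGDsucc : ∀ y, y ∈ vis ++ Δ ↔ pvGDle i bs (dN + 1) y := by
          intro y
          rw [hmem y]
          constructor
          · rintro (h | ⟨x, hx, b, hb, rfl⟩)
            · exact pvGDle_mono ((hvis y).mp h) (Nat.le_succ dN)
            · exact pvGDle_step ((hf x).mp hx).1 hb
          · intro h
            by_cases hd : pvGDle i bs dN y
            · exact Or.inl ((hvis y).mpr hd)
            · obtain ⟨x, b, hb, rfl, hx⟩ := pvGDle_decomp h hd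
              exact Or.inr ⟨x, (hf x).mpr hx, b, hb, rfl⟩
        have hdisj : ∀ y, y ∈ Δ → y ∉ vis := by
          intro y hyΔ hyv
          exact (List.nodup_append.mp hnd').2.2 y hyv y hyΔ rfl
        have hΔiff : ∀ y, y ∈ Δ ↔ pvMD i bs (dN + 1) y := by
          intro y
          constructor
          · intro hyΔ
            have hyv : y ∉ vis := hdisj y hyΔ
            have hg : pvGDle i bs (dN + 1) y :=
              (hGDsucc y).mp (List.mem_append.mpr (Or.inr hyΔ))
            have hnotd : ¬ pvGDle i bs dN y := fun h => hyv ((hvis y).mpr h)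
            refine ⟨hg, ?_⟩
            intro e he hge
            exact hnotd (pvGDle_mono hge (by omega))
          · intro hmd
            have hy : y ∈ vis ++ Δ := (hGDsucc y).mpr hmd.1
            rcases List.mem_append.mp hy with h | h
            · exact absurd ((hvis y).mp h) (hmd.2 dN (Nat.lt_succ_self dN))
            · exact h
        have hcast : ((dN : Int) + 1) = ((dN + 1 : Nat) : Int) := by push_cast; ring
        show pvLevelAux t bs fB
            (f.foldl (fun acc x => pvLStep bs x acc) (vis, [])).2
            (f.foldl (fun acc x => pvLStep bs x acc) (vis, [])).1 ((dN : Int) + 1) = _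
        rw [hfold]
        simp only [List.nil_append]
        rw [hcast]
        by_cases hΔe : Δ = []
        · subst hΔe
          obtain ⟨fB', rfl⟩ : ∃ fB', fB = fB' + 1 := ⟨fB - 1, by omega⟩
          show (if ([] : List Int) = [] then none else _) = _
          rw [if_pos rfl]
          refine (pvUnreachable ?_ htgt').symm
          intro x hx
          exact (List.not_mem_nil (a := x)).elim ((hΔiff x).mpr hx)
        · refine ih Δ (vis ++ Δ) (dN + 1) hΔiff hGDsucc htgt' hnd' ?_
          have hsub : ∀ y ∈ vis ++ Δ, y ∈ pvSpan bs i := by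
            intro y hy
            exact pvGDle_span ((hGDsucc y).mp hy)
          have hlen : (vis ++ Δ).length ≤ (pvSpan bs i).length :=
            pvNodup_subset_length hnd' hsub
          have hΔlen : 1 ≤ Δ.length := by
            cases Δ with
            | nil => exact absurd rfl hΔe
            | cons a l => simp
          simp only [List.length_append] at hlen ⊢
          omega

-- ---------- B's dict fold implements the DP recurrence ----------
theorem pvDpFold_untouched (b : Int) :
    ∀ (L : List (Int × Int)) (nxt : PySem.Dict Int Int) (w : Int),
    (∀ p ∈ L, PySem.Int.bxor p.1 b ≠ w) →
    PySem.Dict.get? (L.foldl (bfsDpInner b) nxt) w = PySem.Dict.get? nxt w := by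
  intro L
  induction L with
  | nil => intro nxt w _; rfl
  | cons p L ih =>
    intro nxt w h
    rw [List.foldl_cons, ih _ _ (fun q hq => h q (List.mem_cons_of_mem _ hq))]
    have hne : w ≠ PySem.Int.bxor p.1 b := (h p (List.mem_cons_self ..)).symm
    unfold bfsDpInner
    cases hg : PySem.Dict.get? nxt (PySem.Int.bxor p.1 b) with
    | none => exact PySem.Dict.get?_insert_of_ne _ _ hne
    | some a =>
      show (if p.2 + 1 < a then PySem.Dict.insert nxt (PySem.Int.bxor p.1 b) (p.2 + 1)
          else nxt).get? w = PySem.Dict.get? nxt w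
      by_cases hlt : p.2 + 1 < a
      · rw [if_pos hlt]; exact PySem.Dict.get?_insert_of_ne _ _ hne
      · rw [if_neg hlt]

theorem pvDpFold_nodup (b : Int) :
    ∀ (L : List (Int × Int)) (nxt : PySem.Dict Int Int), nxt.keys.Nodup →
    (L.foldl (bfsDpInner b) nxt).keys.Nodup := by
  intro L
  induction L with
  | nil => intro nxt h; exact h
  | cons p L ih =>
    intro nxt h
    rw [List.foldl_cons]
    apply ih
    unfold bfsDpInner
    cases hg : PySem.Dict.get? nxt (PySem.Int.bxor p.1 b) with
    | none => exact PySem.Dict.nodup_keys_insert _ _ _ h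
    | some a =>
      show (if p.2 + 1 < a then PySem.Dict.insert nxt (PySem.Int.bxor p.1 b) (p.2 + 1)
          else nxt).keys.Nodup
      by_cases hlt : p.2 + 1 < a
      · rw [if_pos hlt]; exact PySem.Dict.nodup_keys_insert _ _ _ h
      · rw [if_neg hlt]; exact h

theorem pvDpInner_get_self (b : Int) (nxt : PySem.Dict Int Int) (vc : Int × Int) :
    PySem.Dict.get? (bfsDpInner b nxt vc) (PySem.Int.bxor vc.1 b)
      = pvOmin (PySem.Dict.get? nxt (PySem.Int.bxor vc.1 b)) (some (vc.2 + 1)) := by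
  unfold bfsDpInner
  cases hx : PySem.Dict.get? nxt (PySem.Int.bxor vc.1 b) with
  | none => rw [PySem.Dict.get?_insert_self]; rfl
  | some a =>
    show (if vc.2 + 1 < a then PySem.Dict.insert nxt (PySem.Int.bxor vc.1 b) (vc.2 + 1)
        else nxt).get? (PySem.Int.bxor vc.1 b) = pvOmin (some a) (some (vc.2 + 1))
    by_cases hlt : vc.2 + 1 < a
    · rw [if_pos hlt, PySem.Dict.get?_insert_self]
      simp only [pvOmin]
      congr 1
      omega
    · rw [if_neg hlt, hx]
      simp only [pvOmin]
      congr 1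
      omega

theorem pvDpStep_get (dp : PySem.Dict Int Int) (b : Int) (hnd : dp.keys.Nodup) (w : Int) :
    PySem.Dict.get? (bfsDpStep dp b) w
      = pvOmin (PySem.Dict.get? dp w) ((PySem.Dict.get? dp (PySem.Int.bxor w b)).map (· + 1)) := by
  have hinj : ∀ p : Int × Int, PySem.Int.bxor p.1 b = w → p.1 = PySem.Int.bxor w b := by
    intro p hp
    rw [← hp, pvBxor_cancel]
  cases hg : PySem.Dict.get? dp (PySem.Int.bxor w b) with
  | none =>
    have hnm : PySem.Int.bxor w b ∉ dp.keys := by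
      have hg' := hg
      rw [PySem.Dict.get?_eq_none_iff_not_mem_keys] at hg'
      exact hg'
    have huntouched : ∀ p ∈ dp.items, PySem.Int.bxor p.1 b ≠ w := by
      intro p hp hpe
      exact hnm (hinj p hpe ▸ PySem.Dict.mem_keys_of_mem_items dp hp)
    show PySem.Dict.get? ((PySem.Dict.items dp).foldl (bfsDpInner b) dp) w = _
    rw [pvDpFold_untouched b _ dp w huntouched]
    simp [pvOmin_none_right]
  | some c =>
    have hmem : (PySem.Int.bxor w b, c) ∈ dp.items := PySem.Dict.mem_items_of_get?_eq_some dp hg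
    obtain ⟨L1, L2, hsplit⟩ := List.append_of_mem hmem
    have hndm : (dp.items.map Prod.fst).Nodup := by
      simpa [PySem.Dict.keys] using hnd
    rw [hsplit] at hndm
    simp only [List.map_append, List.map_cons] at hndm
    rw [List.nodup_append] at hndm
    have hv0L1 : PySem.Int.bxor w b ∉ L1.map Prod.fst := fun h =>
      hndm.2.2 _ h _ (List.mem_cons_self ..) rfl
    have hv0L2 : PySem.Int.bxor w b ∉ L2.map Prod.fst := (List.nodup_cons.mp hndm.2.1).1
    have hL1 : ∀ p ∈ L1, PySem.Int.bxor p.1 b ≠ w := by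
      intro p hp hpe
      exact hv0L1 (hinj p hpe ▸ List.mem_map_of_mem hp)
    have hL2 : ∀ p ∈ L2, PySem.Int.bxor p.1 b ≠ w := by
      intro p hp hpe
      exact hv0L2 (hinj p hpe ▸ List.mem_map_of_mem hp)
    show PySem.Dict.get? ((PySem.Dict.items dp).foldl (bfsDpInner b) dp) w = _
    rw [hsplit, List.foldl_append, List.foldl_cons,
      pvDpFold_untouched b L2 _ w hL2]
    have h1 : PySem.Dict.get? (L1.foldl (bfsDpInner b) dp) w = PySem.Dict.get? dp w :=
      pvDpFold_untouched b L1 dp w hL1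
    have h2 := pvDpInner_get_self b (L1.foldl (bfsDpInner b) dp) (PySem.Int.bxor w b, c)
    simp only [pvBxor_cancel] at h2
    rw [h2, h1]
    rfl

theorem pvDpRun : ∀ (bs : List Int) (dp : PySem.Dict Int Int) (F : Int → Option Int),
    dp.keys.Nodup → (∀ w, PySem.Dict.get? dp w = F w) →
    ∀ w, PySem.Dict.get? (bs.foldl bfsDpStep dp) w = pvMcF F bs w := by
  intro bs
  induction bs with
  | nil => intro dp F _ hF w; exact hF w
  | cons b bs ih =>
    intro dp F hnd hF w
    rw [List.foldl_cons]
    refine ih (bfsDpStep dp b) (pvStepO F b) (pvDpFold_nodup b _ dp hnd) ?_ w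
    intro v
    rw [pvDpStep_get dp b hnd v, hF, hF]
    rfl

theorem pvB_eq_mc (i t : Int) (bs : List Int) :
    bfs_alt i t bs = pvMc bs (PySem.Int.bxor i t) := by
  show PySem.Dict.get? (bs.foldl bfsDpStep (PySem.Dict.ofList [((0 : Int), (0 : Int))]))
      (PySem.Int.bxor i t) = _
  refine pvDpRun bs _ pvF0 ?_ ?_ (PySem.Int.bxor i t)
  · exact PySem.Dict.nodup_keys_ofList _
  · intro w
    unfold pvF0
    simp [PySem.Dict.ofList, PySem.Dict.update, PySem.Dict.get?_insert]

-- ===== VERDICT (by name: the statement is the Claim_ definition above) =====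
theorem bfs_spec : Claim_equal_bfs := by
  intro initmsk targetmsk buttonsmsk _
  show bfs initmsk targetmsk buttonsmsk = bfs_alt initmsk targetmsk buttonsmsk
  rw [pvA_eq_level, pvB_eq_mc]
  have h0 : ((0 : Nat) : Int) = (0 : Int) := rfl
  refine h0 ▸ pvLevelDP initmsk targetmsk buttonsmsk (2 ^ buttonsmsk.length + 1)
    [initmsk] [initmsk] 0 ?_ ?_ ?_ ?_ ?_
  · intro v
    simp only [List.mem_singleton]
    constructor
    · rintro rfl
      exact ⟨(pvGDle_zero _ _ _).mpr rfl, fun e he => absurd he (Nat.not_lt_zero e)⟩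
    · rintro ⟨hg, _⟩
      exact (pvGDle_zero _ _ _).mp hg
  · intro v
    simp only [List.mem_singleton]
    exact ⟨fun h => (pvGDle_zero _ _ _).mpr h, fun h => (pvGDle_zero _ _ _).mp h⟩
  · intro e he
    exact absurd he (Nat.not_lt_zero e)
  · simp
  · have := pvSpan_length buttonsmsk initmsk
    have hpow : 1 ≤ 2 ^ buttonsmsk.length := Nat.one_le_two_pow
    simp only [List.length_singleton]
    omega
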